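-- pv_equiv track=rewrite | github.com/shreyas-nikam/699342d0a9329869bcc2c2f5 | source.py | categorize_material_topics
-- ===== SOURCE A (Python) =====
-- def categorize_material_topics(material_topics: list) -> dict:
--     """
--     Categorizes material topics into Environmental (E), Social (S), and Governance (G) counts.
--     Used for materiality weighting.
--     """
--     e_count = 0
--     s_count = 0
--     g_count = 0
--     env_keywords = ['GHG Emissions', 'Energy Management',
--                     'Water Management', 'Ecological Impacts', 'Air Quality', 'Emissions']
--     social_keywords = ['Employee Engagement', 'Labor Practices', 'Community Relations', 'Customer Privacy',
--                        'Product Quality & Safety', 'Access to Healthcare', 'Ethical Marketing Practices', 'Human Rights', 'Workforce Safety']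
--     gov_keywords = ['Data Security', 'Business Ethics',
--                     'Systemic Risk', 'Governance', 'Transparency', 'Privacy']
--     for topic in material_topics:
--         topic_lower = topic.lower()
--         if any(keyword.lower() in topic_lower for keyword in env_keywords):
--             e_count += 1
--         elif any(keyword.lower() in topic_lower for keyword in social_keywords):
--             s_count += 1
--         elif any(keyword.lower() in topic_lower for keyword in gov_keywords):
--             g_count += 1
--         else:  # Fallback if not keyword-matched
--             if 'environmental' in topic_lower:
--                 e_count += 1
--             elif 'social' in topic_lower:
--                 s_count += 1
--             elif 'governance' in topic_lower:
--                 g_count += 1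
--             elif 'data security' in topic_lower:
--                 g_count += 1  # Defaulting data security to Governance
--     return {'E': e_count, 'S': s_count, 'G': g_count}
-- ===== SOURCE B (Python) =====
-- def categorize_material_topics(material_topics: list) -> dict:
--     """
--     Categorizes material topics into E/S/G counts by a staged sieve:
--     seven successive passes over a shrinking list, each pass counting and
--     removing the topics matched by one keyword tier (pass order = A's elif order).
--     """
--     env_keywords = ['GHG Emissions', 'Energy Management',
--                     'Water Management', 'Ecological Impacts', 'Air Quality', 'Emissions']
--     social_keywords = ['Employee Engagement', 'Labor Practices', 'Community Relations', 'Customer Privacy',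
--                        'Product Quality & Safety', 'Access to Healthcare', 'Ethical Marketing Practices', 'Human Rights', 'Workforce Safety']
--     gov_keywords = ['Data Security', 'Business Ethics',
--                     'Systemic Risk', 'Governance', 'Transparency', 'Privacy']
--     stages = [
--         ('E', [k.lower() for k in env_keywords]),
--         ('S', [k.lower() for k in social_keywords]),
--         ('G', [k.lower() for k in gov_keywords]),
--         ('E', ['environmental']),
--         ('S', ['social']),
--         ('G', ['governance']),
--         ('G', ['data security']),
--     ]
--     counts = {'E': 0, 'S': 0, 'G': 0}
--     remaining = [t.lower() for t in material_topics]
--     for cat, kws in stages: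
--         matched = 0
--         miss = []
--         for t in remaining:
--             if any(k in t for k in kws):
--                 matched += 1
--             else:
--                 miss.append(t)
--         counts[cat] += matched
--         remaining = miss
--     return counts
-- ===== Notes on version B (the rewrite author's own statement) =====
-- stated objective: alternative
-- what changed: A makes a single pass over the topics classifying each with a 7-way if/elif cascade and three counters; B instead runs seven staged sieve passes over a shrinking list, each pass counting and filtering out the topics matched by one keyword tier (pass order preserving A's elif priority), accumulating into a dict.
import Mathlib
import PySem

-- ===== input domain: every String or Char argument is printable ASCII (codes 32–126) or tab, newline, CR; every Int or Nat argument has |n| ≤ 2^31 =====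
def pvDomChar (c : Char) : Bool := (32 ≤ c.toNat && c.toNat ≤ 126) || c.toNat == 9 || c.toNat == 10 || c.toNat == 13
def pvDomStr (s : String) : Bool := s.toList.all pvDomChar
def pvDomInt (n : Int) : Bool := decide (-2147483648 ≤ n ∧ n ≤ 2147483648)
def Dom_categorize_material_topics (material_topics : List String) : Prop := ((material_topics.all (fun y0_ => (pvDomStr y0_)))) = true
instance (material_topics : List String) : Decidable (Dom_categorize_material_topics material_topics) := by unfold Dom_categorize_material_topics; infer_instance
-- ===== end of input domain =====

-- B replaces A's single pass with a per-topic 7-way elif cascade by seven staged sieve passes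
-- over a shrinking list (each pass counts and removes one keyword tier's matches) — an alternative decomposition, same cost.

-- ===== PORT A =====
def categorize_material_topics (material_topics : List String) : List (String × Int) :=
  let env_keywords : List String := ["GHG Emissions", "Energy Management",
    "Water Management", "Ecological Impacts", "Air Quality", "Emissions"]
  let social_keywords : List String := ["Employee Engagement", "Labor Practices", "Community Relations",
    "Customer Privacy", "Product Quality & Safety", "Access to Healthcare",
    "Ethical Marketing Practices", "Human Rights", "Workforce Safety"]
  let gov_keywords : List String := ["Data Security", "Business Ethics",
    "Systemic Risk", "Governance", "Transparency", "Privacy"]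
  let r : Int × Int × Int := material_topics.foldl (fun (acc : Int × Int × Int) topic =>
    let topic_lower := PySem.Str.lower topic
    if env_keywords.any (fun keyword => PySem.Str.isIn (PySem.Str.lower keyword) topic_lower) then
      (acc.1 + 1, acc.2.1, acc.2.2)
    else if social_keywords.any (fun keyword => PySem.Str.isIn (PySem.Str.lower keyword) topic_lower) then
      (acc.1, acc.2.1 + 1, acc.2.2)
    else if gov_keywords.any (fun keyword => PySem.Str.isIn (PySem.Str.lower keyword) topic_lower) then
      (acc.1, acc.2.1, acc.2.2 + 1)
    else if PySem.Str.isIn "environmental" topic_lower then (acc.1 + 1, acc.2.1, acc.2.2)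
    else if PySem.Str.isIn "social" topic_lower then (acc.1, acc.2.1 + 1, acc.2.2)
    else if PySem.Str.isIn "governance" topic_lower then (acc.1, acc.2.1, acc.2.2 + 1)
    else if PySem.Str.isIn "data security" topic_lower then (acc.1, acc.2.1, acc.2.2 + 1)
    else acc) (0, 0, 0)
  [("E", r.1), ("S", r.2.1), ("G", r.2.2)]

-- ===== PORT B =====
def pvStages : List (String × List String) :=
  [ ("E", (["GHG Emissions", "Energy Management", "Water Management",
      "Ecological Impacts", "Air Quality", "Emissions"] : List String).map PySem.Str.lower),
    ("S", (["Employee Engagement", "Labor Practices", "Community Relations", "Customer Privacy",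
      "Product Quality & Safety", "Access to Healthcare", "Ethical Marketing Practices",
      "Human Rights", "Workforce Safety"] : List String).map PySem.Str.lower),
    ("G", (["Data Security", "Business Ethics", "Systemic Risk",
      "Governance", "Transparency", "Privacy"] : List String).map PySem.Str.lower),
    ("E", ["environmental"]),
    ("S", ["social"]),
    ("G", ["governance"]),
    ("G", ["data security"]) ]

def categorize_material_topics_alt (material_topics : List String) : List (String × Int) :=
  let counts0 : PySem.Dict String Int := ((PySem.Dict.empty.insert "E" 0).insert "S" 0).insert "G" 0
  let remaining0 := material_topics.map PySem.Str.lower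
  let final := pvStages.foldl (fun (st : PySem.Dict String Int × List String) stage =>
    let r := st.2.foldl (fun (acc : Int × List String) t =>
      if stage.2.any (fun k => PySem.Str.isIn k t) then (acc.1 + 1, acc.2)
      else (acc.1, acc.2 ++ [t])) ((0 : Int), ([] : List String))
    (st.1.modify stage.1 0 (· + r.1), r.2)) (counts0, remaining0)
  final.1.items

-- ===== PRECONDITION & SPEC =====
def Spec_categorize_material_topics (material_topics : List String) (out : List (String × Int)) : Prop := out = categorize_material_topics_alt material_topics
instance (material_topics : List String) (out : List (String × Int)) : Decidable (Spec_categorize_material_topics material_topics out) := by unfold Spec_categorize_material_topics; infer_instance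

-- ===== CLAIM (what is proved, stated in full; the proofs are below) =====
def Claim_equal_categorize_material_topics : Prop := ∀ (material_topics : List String), Dom_categorize_material_topics material_topics → Spec_categorize_material_topics material_topics (categorize_material_topics material_topics)

-- ===== LEMMAS AND PROOFS =====

-- Helpers for the proof: the tier predicates on an (already lowered) topic.
def pvQ (kws : List String) (t : String) : Bool := kws.any (fun k => PySem.Str.isIn k t)

def pvK1 : List String := (["GHG Emissions", "Energy Management", "Water Management",
  "Ecological Impacts", "Air Quality", "Emissions"] : List String).map PySem.Str.lower
def pvK2 : List String := (["Employee Engagement", "Labor Practices", "Community Relations",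
  "Customer Privacy", "Product Quality & Safety", "Access to Healthcare",
  "Ethical Marketing Practices", "Human Rights", "Workforce Safety"] : List String).map PySem.Str.lower
def pvK3 : List String := (["Data Security", "Business Ethics", "Systemic Risk",
  "Governance", "Transparency", "Privacy"] : List String).map PySem.Str.lower

-- The counts both programs compute, written as the sieve's filter chain over the lowered topics.
def pvCnt (material_topics : List String) : Int × Int × Int :=
  let L := material_topics.map PySem.Str.lower
  let n1 := (L.filter (pvQ pvK1)).length
  let L1 := L.filter (fun t => !pvQ pvK1 t)
  let n2 := (L1.filter (pvQ pvK2)).length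
  let L2 := L1.filter (fun t => !pvQ pvK2 t)
  let n3 := (L2.filter (pvQ pvK3)).length
  let L3 := L2.filter (fun t => !pvQ pvK3 t)
  let n4 := (L3.filter (pvQ ["environmental"])).length
  let L4 := L3.filter (fun t => !pvQ ["environmental"] t)
  let n5 := (L4.filter (pvQ ["social"])).length
  let L5 := L4.filter (fun t => !pvQ ["social"] t)
  let n6 := (L5.filter (pvQ ["governance"])).length
  let L6 := L5.filter (fun t => !pvQ ["governance"] t)
  let n7 := (L6.filter (pvQ ["data security"])).length
  ((0 : Int) + n1 + n4, (0 : Int) + n2 + n5, (0 : Int) + n3 + n6 + n7)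

def pvStepA (acc : Int × Int × Int) (topic : String) : Int × Int × Int :=
  let env_keywords : List String := ["GHG Emissions", "Energy Management",
    "Water Management", "Ecological Impacts", "Air Quality", "Emissions"]
  let social_keywords : List String := ["Employee Engagement", "Labor Practices", "Community Relations",
    "Customer Privacy", "Product Quality & Safety", "Access to Healthcare",
    "Ethical Marketing Practices", "Human Rights", "Workforce Safety"]
  let gov_keywords : List String := ["Data Security", "Business Ethics",
    "Systemic Risk", "Governance", "Transparency", "Privacy"]
  let topic_lower := PySem.Str.lower topic
  if env_keywords.any (fun keyword => PySem.Str.isIn (PySem.Str.lower keyword) topic_lower) then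
    (acc.1 + 1, acc.2.1, acc.2.2)
  else if social_keywords.any (fun keyword => PySem.Str.isIn (PySem.Str.lower keyword) topic_lower) then
    (acc.1, acc.2.1 + 1, acc.2.2)
  else if gov_keywords.any (fun keyword => PySem.Str.isIn (PySem.Str.lower keyword) topic_lower) then
    (acc.1, acc.2.1, acc.2.2 + 1)
  else if PySem.Str.isIn "environmental" topic_lower then (acc.1 + 1, acc.2.1, acc.2.2)
  else if PySem.Str.isIn "social" topic_lower then (acc.1, acc.2.1 + 1, acc.2.2)
  else if PySem.Str.isIn "governance" topic_lower then (acc.1, acc.2.1, acc.2.2 + 1)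
  else if PySem.Str.isIn "data security" topic_lower then (acc.1, acc.2.1, acc.2.2 + 1)
  else acc

-- A's branch conditions are the stage predicates (keywords lowered inside the any vs. pre-lowered list).
theorem pvCond1 (tl : String) :
    (["GHG Emissions", "Energy Management", "Water Management", "Ecological Impacts",
      "Air Quality", "Emissions"] : List String).any
        (fun keyword => PySem.Str.isIn (PySem.Str.lower keyword) tl) = pvQ pvK1 tl := by
  simp [pvQ, pvK1, List.any_cons, List.any_nil, List.map_cons, List.map_nil]

theorem pvCond2 (tl : String) :
    (["Employee Engagement", "Labor Practices", "Community Relations", "Customer Privacy",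
      "Product Quality & Safety", "Access to Healthcare", "Ethical Marketing Practices",
      "Human Rights", "Workforce Safety"] : List String).any
        (fun keyword => PySem.Str.isIn (PySem.Str.lower keyword) tl) = pvQ pvK2 tl := by
  simp [pvQ, pvK2, List.any_cons, List.any_nil, List.map_cons, List.map_nil]

theorem pvCond3 (tl : String) :
    (["Data Security", "Business Ethics", "Systemic Risk", "Governance",
      "Transparency", "Privacy"] : List String).any
        (fun keyword => PySem.Str.isIn (PySem.Str.lower keyword) tl) = pvQ pvK3 tl := by
  simp [pvQ, pvK3, List.any_cons, List.any_nil, List.map_cons, List.map_nil]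

theorem pvQ_singleton (k tl : String) : pvQ [k] tl = PySem.Str.isIn k tl := by
  simp [pvQ]

-- Sieve/cascade agreement: A's step, with its conditions rewritten to the stage predicates.
theorem pvStepA_eq (acc : Int × Int × Int) (t : String) : pvStepA acc t =
    (let tl := PySem.Str.lower t
     if pvQ pvK1 tl then (acc.1 + 1, acc.2.1, acc.2.2)
     else if pvQ pvK2 tl then (acc.1, acc.2.1 + 1, acc.2.2)
     else if pvQ pvK3 tl then (acc.1, acc.2.1, acc.2.2 + 1)
     else if pvQ ["environmental"] tl then (acc.1 + 1, acc.2.1, acc.2.2)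
     else if pvQ ["social"] tl then (acc.1, acc.2.1 + 1, acc.2.2)
     else if pvQ ["governance"] tl then (acc.1, acc.2.1, acc.2.2 + 1)
     else if pvQ ["data security"] tl then (acc.1, acc.2.1, acc.2.2 + 1)
     else acc) := by
  simp only [pvStepA, pvCond1, pvCond2, pvCond3, pvQ_singleton]

-- pvCnt satisfies the same recurrence as A's fold step.
theorem pvCnt_cons (t : String) (ts : List String) :
    pvCnt (t :: ts) = pvStepA (pvCnt ts) t := by
  rw [pvStepA_eq]
  by_cases h1 : pvQ pvK1 (PySem.Str.lower t)
  · simp [pvCnt, List.filter_cons, h1]; omega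
  · by_cases h2 : pvQ pvK2 (PySem.Str.lower t)
    · simp [pvCnt, List.filter_cons, h1, h2]; omega
    · by_cases h3 : pvQ pvK3 (PySem.Str.lower t)
      · simp [pvCnt, List.filter_cons, h1, h2, h3]; omega
      · by_cases h4 : pvQ ["environmental"] (PySem.Str.lower t)
        · simp [pvCnt, List.filter_cons, h1, h2, h3, h4]; omega
        · by_cases h5 : pvQ ["social"] (PySem.Str.lower t)
          · simp [pvCnt, List.filter_cons, h1, h2, h3, h4, h5]; omega
          · by_cases h6 : pvQ ["governance"] (PySem.Str.lower t)
            · simp [pvCnt, List.filter_cons, h1, h2, h3, h4, h5, h6]; omega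
            · by_cases h7 : pvQ ["data security"] (PySem.Str.lower t)
              · simp [pvCnt, List.filter_cons, h1, h2, h3, h4, h5, h6, h7]; omega
              · simp [pvCnt, List.filter_cons, h1, h2, h3, h4, h5, h6, h7]

-- A's fold, started from an arbitrary accumulator, adds pvCnt componentwise.
theorem pvA_char (ts : List String) : ∀ e s g : Int,
    ts.foldl pvStepA (e, s, g) =
      (e + (pvCnt ts).1, s + (pvCnt ts).2.1, g + (pvCnt ts).2.2) := by
  induction ts with
  | nil => intro e s g; simp [pvCnt]
  | cons t ts ih =>
    intro e s g
    simp only [List.foldl_cons]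
    rw [pvCnt_cons]
    -- case on which branch of pvStepA fires for t, uniformly
    simp only [pvStepA]
    split_ifs <;> simp [ih] <;> omega

-- One sieve pass: a count-and-keep fold equals a count of matches plus the filter of misses.
theorem pvSieve (p : String → Bool) : ∀ (rem : List String) (n : Int) (ms : List String),
    rem.foldl (fun (acc : Int × List String) t =>
      if p t then (acc.1 + 1, acc.2) else (acc.1, acc.2 ++ [t])) (n, ms)
      = (n + ((rem.filter p).length : Int), ms ++ rem.filter (fun t => !p t)) := by
  intro rem
  induction rem with
  | nil => intro n ms; simp
  | cons t rem ih =>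
    intro n ms
    by_cases h : p t
    · simp [List.foldl_cons, List.filter_cons, h, ih]; omega
    · simp [List.foldl_cons, List.filter_cons, h, ih]

-- The counts dict as a function of its three values, with computation lemmas for the bumps.
def pvD (e s g : Int) : PySem.Dict String Int :=
  ((PySem.Dict.empty.insert "E" e).insert "S" s).insert "G" g

theorem pvModE (e s g n : Int) : (pvD e s g).modify "E" 0 (· + n) = pvD (e + n) s g := rfl
theorem pvModS (e s g n : Int) : (pvD e s g).modify "S" 0 (· + n) = pvD e (s + n) g := rfl
theorem pvModG (e s g n : Int) : (pvD e s g).modify "G" 0 (· + n) = pvD e s (g + n) := rfl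
theorem pvItems (e s g : Int) : (pvD e s g).items = [("E", e), ("S", s), ("G", g)] := rfl

-- B's staged fold, unfolded over the concrete 7 stages, yields exactly pvCnt.
theorem pvB_char (ts : List String) :
    categorize_material_topics_alt ts =
      [("E", (pvCnt ts).1), ("S", (pvCnt ts).2.1), ("G", (pvCnt ts).2.2)] := by
  have hd : ((PySem.Dict.empty.insert "E" (0 : Int)).insert "S" 0).insert "G" 0 = pvD 0 0 0 := rfl
  simp only [categorize_material_topics_alt, pvStages, List.foldl_cons, List.foldl_nil, pvSieve,
    List.nil_append, zero_add, hd, pvModE, pvModS, pvModG, pvItems, pvCnt, pvQ, pvK1, pvK2, pvK3]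
  rfl

-- ===== VERDICT (by name: the statement is the Claim_ definition above) =====
theorem categorize_material_topics_spec : Claim_equal_categorize_material_topics := by
  intro material_topics _
  unfold Spec_categorize_material_topics
  rw [pvB_char]
  show (let r := material_topics.foldl pvStepA ((0 : Int), (0 : Int), (0 : Int));
    [("E", r.1), ("S", r.2.1), ("G", r.2.2)]) = _
  rw [pvA_char]
  simp
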